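-- pv_equiv track=rewrite | github.com/apksqrd/Math-Challenges | tailFinder.py | tailFinder
-- ===== SOURCE A (Python) =====
-- p=2
--
-- def elementFinder(m, n):
--     return (p**n)%m
--
-- def sequenceFinder(m):
--     seq=[]
--     n=1
--     while True:
--         s=elementFinder(m ,n)
--         if s in seq:
--             return seq+[s]
--         seq.append(s)
--         n+=1
--
-- def tailFinder(m):
--     seq=sequenceFinder(m)
--     numbersUsed=[]
--     firstDuplicate=None
--     n=0
--     while firstDuplicate==None:
--         if seq[n] in numbersUsed:
--             firstDuplicate=seq[n]
--         numbersUsed.append(seq[n])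
--         n+=1
--     for n in range(len(seq)):
--         if seq[n]==firstDuplicate:
--             return seq[:n]
-- ===== SOURCE B (Python) =====
-- def tailFinder(m):
--     idx = {}
--     seq = []
--     s = 2 % m
--     while s not in idx:
--         idx[s] = len(seq)
--         seq.append(s)
--         s = s * 2 % m
--     return seq[:idx[s]]
-- ===== Notes on version B (the rewrite author's own statement) =====
-- stated objective: faster
-- what changed: One pass that updates the residue by an incremental multiply-mod (instead of recomputing 2**n from scratch each step) and finds the first repeat with a dict mapping value to first index, replacing A's repeated list-membership scans and its two extra rescans of the finished sequence.
import Mathlib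
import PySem

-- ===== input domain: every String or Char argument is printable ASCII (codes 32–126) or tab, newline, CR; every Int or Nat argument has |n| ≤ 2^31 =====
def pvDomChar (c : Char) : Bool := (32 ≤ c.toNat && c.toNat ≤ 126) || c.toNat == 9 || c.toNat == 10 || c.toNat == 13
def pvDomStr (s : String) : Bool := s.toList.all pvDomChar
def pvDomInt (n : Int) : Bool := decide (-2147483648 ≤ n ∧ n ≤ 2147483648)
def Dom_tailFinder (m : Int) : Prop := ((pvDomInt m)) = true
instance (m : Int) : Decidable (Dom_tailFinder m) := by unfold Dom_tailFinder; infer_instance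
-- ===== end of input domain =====

-- B replaces A's rebuilt exponentiations and quadratic list scans by one incremental
-- modular-multiply pass with a dict mapping each value to its first index (objective: faster).

-- ===== PORT A =====
def elementFinder (m : Int) (n : Nat) : Int := PySem.Int.mod (2 ^ n) m

-- 'while True' loop of sequenceFinder; fuel m.natAbs + 2 (≥ the ≤ |m| distinct residues + the repeat)
def seqLoop (m : Int) : Nat → List Int → Nat → List Int
  | 0, seq, _ => seq
  | fuel+1, seq, n =>
    let s := elementFinder m n
    if s ∈ seq then seq ++ [s]
    else seqLoop m fuel (seq ++ [s]) (n+1)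

def sequenceFinder (m : Int) : List Int := seqLoop m (m.natAbs + 2) [] 1

-- the 'while firstDuplicate==None' scan: first element already in numbersUsed
def findDup : List Int → List Int → Option Int
  | [], _ => none
  | x :: rest, used => if x ∈ used then some x else findDup rest (used ++ [x])

-- the 'for n in range(len(seq))' loop: returns seq[:n] at the first n with seq[n] == d
def prefixBefore : List Int → Int → List Int
  | [], _ => []
  | x :: rest, d => if x = d then [] else x :: prefixBefore rest d

def tailFinder (m : Int) : List Int :=
  let seq := sequenceFinder m
  match findDup seq [] with
  | some d => prefixBefore seq d
  | none => []    -- unreachable for m ≠ 0: the built sequence always ends in a duplicate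

-- ===== PORT B =====
-- 'while s not in idx' loop of Source B; same fuel bound as A's loop
def altLoop (m : Int) : Nat → PySem.Dict Int Int → List Int → Int → List Int
  | 0, _, _, _ => []
  | fuel+1, idx, seq, s =>
    match idx.get? s with
    | some i => PySem.List.slice seq none (some i)
    | none => altLoop m fuel (idx.insert s (seq.length : Int)) (seq ++ [s]) (PySem.Int.mod (s * 2) m)

def tailFinder_alt (m : Int) : List Int :=
  altLoop m (m.natAbs + 2) PySem.Dict.empty [] (PySem.Int.mod 2 m)

-- ===== PRECONDITION & SPEC =====
-- Pre_ excludes only m = 0, on which Python A raises ZeroDivisionError.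
def Pre_tailFinder (m : Int) : Prop := m ≠ 0
instance (m : Int) : Decidable (Pre_tailFinder m) := by unfold Pre_tailFinder; infer_instance
def pvWitness_tailFinder : Int := (5)

def Spec_tailFinder (m : Int) (out : List Int) : Prop := out = tailFinder_alt m
instance (m : Int) (out : List Int) : Decidable (Spec_tailFinder m out) := by unfold Spec_tailFinder; infer_instance

-- ===== CLAIM (what is proved, stated in full; the proofs are below) =====
def Claim_equal_tailFinder : Prop := ∀ (m : Int), Dom_tailFinder m → Pre_tailFinder m → Spec_tailFinder m (tailFinder m)

-- ===== LEMMAS AND PROOFS =====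

-- floor-mod congruence: multiplying a residue is the same as multiplying before reducing
lemma fmod_congr (x y m : Int) (h : x % m = y % m) : Int.fmod x m = Int.fmod y m := by
  rw [Int.fmod_eq_emod, Int.fmod_eq_emod, h]
  simp only [Int.dvd_iff_emod_eq_zero, h]

lemma mod_mul_step (a c m : Int) : PySem.Int.mod (PySem.Int.mod a m * c) m = PySem.Int.mod (a * c) m := by
  show Int.fmod (Int.fmod a m * c) m = Int.fmod (a * c) m
  apply fmod_congr
  conv_rhs => rw [Int.mul_emod, ← Int.emod_emod_of_dvd _ (dvd_refl m)]
  rw [Int.fmod_eq_emod]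
  split_ifs <;> simp [Int.mul_emod]

lemma step_eq (m : Int) (n : Nat) :
    PySem.Int.mod (elementFinder m n * 2) m = elementFinder m (n + 1) := by
  simp [elementFinder, mod_mul_step, pow_succ]

lemma findDup_none (l : List Int) : ∀ used, l.Nodup → (∀ x ∈ l, x ∉ used) →
    findDup l used = none := by
  induction l with
  | nil => intro used _ _; rfl
  | cons x rest ih =>
    intro used hnd hdisj
    have hx : x ∉ used := hdisj x (by simp)
    simp only [findDup, if_neg hx]
    exact ih _ hnd.of_cons (by
      intro y hy
      simp only [List.mem_append, List.mem_singleton]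
      rintro (h | rfl)
      · exact hdisj y (by simp [hy]) h
      · exact (List.nodup_cons.mp hnd).1 hy)

lemma findDup_app (l : List Int) (s : Int) : ∀ used, l.Nodup → (∀ x ∈ l, x ∉ used) →
    (s ∈ l ∨ s ∈ used) → findDup (l ++ [s]) used = some s := by
  induction l with
  | nil =>
    intro used _ _ hs
    simp only [List.nil_append, findDup]
    rw [if_pos (by tauto)]
  | cons x rest ih =>
    intro used hnd hdisj hs
    have hx : x ∉ used := hdisj x (by simp)
    simp only [List.cons_append, findDup, if_neg hx]
    apply ih _ hnd.of_cons
    · intro y hy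
      simp only [List.mem_append, List.mem_singleton]
      rintro (h | rfl)
      · exact hdisj y (by simp [hy]) h
      · exact (List.nodup_cons.mp hnd).1 hy
    · rcases hs with h | h
      · rcases List.mem_cons.mp h with rfl | h
        · right; simp
        · left; exact h
      · right; simp [h]

lemma prefixBefore_append (l t : List Int) (s : Int) (h : s ∈ l) :
    prefixBefore (l ++ t) s = l.take (l.idxOf s) := by
  induction l with
  | nil => simp at h
  | cons x rest ih =>
    by_cases hx : x = s
    · subst hx; simp [prefixBefore, List.idxOf_cons_self]
    · have hs : s ∈ rest := by rcases List.mem_cons.mp h with h' | h' <;> [exact absurd h'.symm hx; exact h']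
      simp only [List.cons_append, prefixBefore, if_neg hx]
      rw [ih hs, List.idxOf_cons_ne _ (by simpa using hx), List.take_succ_cons]

lemma idxOf_append_left (l : List Int) (x s : Int) (h : x ∈ l) :
    (l ++ [s]).idxOf x = l.idxOf x := List.idxOf_append_of_mem h

-- the joint loop invariant: A's remaining computation equals B's
lemma loop_eq (m : Int) : ∀ (fuel : Nat) (seq : List Int) (idx : PySem.Dict Int Int) (n : Nat),
    seq.Nodup →
    (∀ x : Int, idx.get? x = if x ∈ seq then some (seq.idxOf x : Int) else none) →
    (match findDup (seqLoop m fuel seq n) [] with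
      | some d => prefixBefore (seqLoop m fuel seq n) d
      | none => ([] : List Int)) = altLoop m fuel idx seq (elementFinder m n) := by
  intro fuel
  induction fuel with
  | zero =>
    intro seq idx n hnd _
    simp [seqLoop, altLoop, findDup_none seq [] hnd (by simp)]
  | succ fuel ih =>
    intro seq idx n hnd hidx
    by_cases hs : elementFinder m n ∈ seq
    · -- duplicate found: A returns the slice via its two scans, B via the dict
      have hA : seqLoop m (fuel+1) seq n = seq ++ [elementFinder m n] := by
        simp [seqLoop, hs]
      rw [hA, findDup_app seq _ [] hnd (by simp) (Or.inl hs)]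
      show prefixBefore (seq ++ [elementFinder m n]) (elementFinder m n) =
        altLoop m (fuel + 1) idx seq (elementFinder m n)
      rw [prefixBefore_append seq _ _ hs]
      simp only [altLoop, hidx, if_pos hs]
      rw [PySem.List.slice_to_natCast]
    · have hA : seqLoop m (fuel+1) seq n = seqLoop m fuel (seq ++ [elementFinder m n]) (n+1) := by
        simp [seqLoop, hs]
      rw [hA]
      simp only [altLoop, hidx, if_neg hs]
      rw [step_eq]
      apply ih
      · simp [List.nodup_append, hnd]
        exact fun a ha h => hs (h ▸ ha)
      · intro x
        by_cases hx : x = elementFinder m n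
        · subst hx
          rw [PySem.Dict.get?_insert_self]
          simp [List.idxOf_append_of_notMem hs, List.idxOf_cons_self]
        · rw [PySem.Dict.get?_insert_of_ne _ _ hx, hidx x]
          by_cases hmem : x ∈ seq
          · simp [hmem, idxOf_append_left _ _ _ hmem]
          · simp [hmem, hx]

-- ===== VERDICT (by name: the statement is the Claim_ definition above) =====
theorem tailFinder_spec : Claim_equal_tailFinder := by
  intro m _ _
  show tailFinder m = tailFinder_alt m
  have h := loop_eq m (m.natAbs + 2) [] PySem.Dict.empty 1 (by simp)
    (by intro x; simp [PySem.Dict.get?, PySem.Dict.empty])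
  simpa [tailFinder, sequenceFinder, tailFinder_alt, elementFinder, pow_one] using h
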